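-- pv_equiv track=rewrite | github.com/Sorembon/web_lab_aib_frontend | labs/Lab_12_python_intro/solution/zadOleg.py | individual_medians
-- ===== SOURCE A (Python) =====
-- import heapq
--
-- def individual_medians(n, arr):
--     max_heap = []
--     min_heap = []
--     medians = []
--
--     for i in range(n):
--         heapq.heappush(max_heap, -arr[i])
--         heapq.heappush(min_heap, -heapq.heappop(max_heap))
--
--         if len(min_heap) > len(max_heap):
--             heapq.heappush(max_heap, -heapq.heappop(min_heap))
--
--         median = -max_heap[0] if (i + 1) % 2 == 1 else (min_heap[0] - max_heap[0]) / 2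
--         medians.append(int(median))
--
--     return medians
-- ===== SOURCE B (Python) =====
-- import bisect
--
-- def individual_medians(n, arr):
--     ordered = []
--     medians = []
--     for i in range(n):
--         bisect.insort(ordered, arr[i])
--         length = len(ordered)
--         if length % 2 == 1:
--             medians.append(int(ordered[length // 2]))
--         else:
--             medians.append(int((ordered[length // 2 - 1] + ordered[length // 2]) / 2))
--     return medians
-- ===== Notes on version B (the rewrite author's own statement) =====
-- stated objective: alternative
-- what changed: Replaces the two-heap (max-heap/min-heap) rebalancing scheme with a single list kept sorted by bisect.insort, reading the median(s) directly by index parity.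
import Mathlib
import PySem

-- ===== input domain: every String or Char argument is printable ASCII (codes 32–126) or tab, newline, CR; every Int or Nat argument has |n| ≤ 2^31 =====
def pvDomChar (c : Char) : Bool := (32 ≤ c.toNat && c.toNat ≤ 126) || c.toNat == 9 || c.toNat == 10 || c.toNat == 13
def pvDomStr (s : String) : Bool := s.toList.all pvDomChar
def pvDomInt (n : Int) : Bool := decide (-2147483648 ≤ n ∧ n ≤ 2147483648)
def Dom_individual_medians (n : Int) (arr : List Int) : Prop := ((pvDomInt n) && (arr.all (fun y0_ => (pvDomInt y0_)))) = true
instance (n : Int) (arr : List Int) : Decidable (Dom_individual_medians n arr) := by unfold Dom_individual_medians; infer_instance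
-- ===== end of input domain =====

-- B replaces A's two-heap (negated max-heap + min-heap) rebalancing with a single
-- list kept sorted by bisect.insort, reading the median(s) directly by index parity
-- (objective: alternative — a genuinely different data structure, similar cost).

-- ===== PORT A =====
-- A's heapq min-heaps are modelled by sorted lists: heappush = ordered insert,
-- heappop = take the head, heap[0] = head.  This is exact for everything A observes
-- of a heap — its minimum, its length and its multiset of elements — though the
-- internal array layout of CPython's binary heap is not reproduced (it is never read).
def imBodyA (arr : List Int) (st : List Int × List Int × List Int) (i : Int) :
    List Int × List Int × List Int :=
  let maxh := st.1
  let minh := st.2.1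
  let meds := st.2.2
  let x := PySem.List.pyGetD arr i 0
  -- heapq.heappush(max_heap, -arr[i]); heapq.heappush(min_heap, -heapq.heappop(max_heap))
  let maxh1 := List.orderedInsert (· ≤ ·) (-x) maxh
  let maxh2 := maxh1.tail
  let minh1 := List.orderedInsert (· ≤ ·) (-(maxh1.headD 0)) minh
  -- if len(min_heap) > len(max_heap): heapq.heappush(max_heap, -heapq.heappop(min_heap))
  let p := if minh1.length > maxh2.length then
      (List.orderedInsert (· ≤ ·) (-(minh1.headD 0)) maxh2, minh1.tail)
    else (maxh2, minh1)
  -- median = -max_heap[0] if (i+1) % 2 == 1 else (min_heap[0] - max_heap[0]) / 2 ; int(median)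
  let med := if PySem.Int.mod (i + 1) 2 == 1 then -(p.1.headD 0)
    else PySem.Int.truncdiv (p.2.headD 0 - p.1.headD 0) 2
  (p.1, p.2, meds ++ [med])

def individual_medians (n : Int) (arr : List Int) : List Int :=
  ((PySem.List.pyRange 0 n 1).foldl (imBodyA arr) ([], [], [])).2.2

-- ===== PORT B =====
def imBodyB (arr : List Int) (st : List Int × List Int) (i : Int) : List Int × List Int :=
  let ordered := st.1
  let meds := st.2
  let x := PySem.List.pyGetD arr i 0
  -- bisect.insort(ordered, arr[i])
  let ordered1 := PySem.List.insert ordered ((PySem.List.bisectRight ordered x : Nat) : Int) x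
  let length := ordered1.length
  let med := if length % 2 == 1 then ordered1.getD (length / 2) 0
    else PySem.Int.truncdiv (ordered1.getD (length / 2 - 1) 0 + ordered1.getD (length / 2) 0) 2
  (ordered1, meds ++ [med])

def individual_medians_alt (n : Int) (arr : List Int) : List Int :=
  ((PySem.List.pyRange 0 n 1).foldl (imBodyB arr) ([], [])).2

-- ===== PRECONDITION & SPEC =====
-- Pre_ excludes exactly the inputs with n > len(arr), on which A raises IndexError.
def Pre_individual_medians (n : Int) (arr : List Int) : Prop := n ≤ (arr.length : Int)
instance (n : Int) (arr : List Int) : Decidable (Pre_individual_medians n arr) := by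
  unfold Pre_individual_medians; infer_instance
def pvWitness_individual_medians : Int × List Int := (3, [5, 1, 2])

def Spec_individual_medians (n : Int) (arr : List Int) (out : List Int) : Prop := out = individual_medians_alt n arr
instance (n : Int) (arr : List Int) (out : List Int) : Decidable (Spec_individual_medians n arr out) := by unfold Spec_individual_medians; infer_instance

-- ===== CLAIM (what is proved, stated in full; the proofs are below) =====
def Claim_equal_individual_medians : Prop := ∀ (n : Int) (arr : List Int), Dom_individual_medians n arr → Pre_individual_medians n arr → Spec_individual_medians n arr (individual_medians n arr)

-- ===== LEMMAS AND PROOFS =====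

-- Two sorted lists of integers with the same multiset are equal.
theorem im_sorted_eq_of_perm (u v : List Int) (hu : u.Pairwise (· ≤ ·))
    (hv : v.Pairwise (· ≤ ·)) (h : u.Perm v) : u = v :=
  h.eq_of_pairwise (fun _ _ _ _ hab hba => le_antisymm hab hba) hu hv

-- Negating and reversing a (≤)-sorted list yields a (≤)-sorted list.
theorem im_negrev_pairwise (l : List Int) (hl : l.Pairwise (· ≤ ·)) :
    ((l.map (fun v => -v)).reverse).Pairwise (· ≤ ·) := by
  rw [List.pairwise_reverse, List.pairwise_map]
  exact hl.imp (by omega)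

-- Ordered insert commutes with negate-and-reverse.
theorem im_negrev_orderedInsert (l : List Int) (hl : l.Pairwise (· ≤ ·)) (x : Int) :
    List.orderedInsert (· ≤ ·) (-x) ((l.map (fun v => -v)).reverse)
      = (((List.orderedInsert (· ≤ ·) x l).map (fun v => -v)).reverse) := by
  apply im_sorted_eq_of_perm
  · exact List.Pairwise.orderedInsert _ _ (im_negrev_pairwise l hl)
  · exact im_negrev_pairwise _ (List.Pairwise.orderedInsert x l hl)
  · have h1 := List.perm_orderedInsert (· ≤ ·) (-x) ((l.map (fun v => -v)).reverse)
    have h2 : ((l.map (fun v => -v)).reverse).Perm (l.map (fun v => -v)) := List.reverse_perm _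
    have h3 : ((x :: l).map (fun v => -v)).Perm ((List.orderedInsert (· ≤ ·) x l).map (fun v => -v)) :=
      ((List.perm_orderedInsert (· ≤ ·) x l).symm.map _)
    exact h1.trans ((h2.cons _).trans (h3.trans (List.reverse_perm _).symm))

-- Inserting an element greater than everything appends it.
theorem im_orderedInsert_of_forall_not (l : List Int) (x : Int)
    (h : ∀ w ∈ l, ¬ x ≤ w) : List.orderedInsert (· ≤ ·) x l = l ++ [x] := by
  induction l with
  | nil => rfl
  | cons y t ih =>
    rw [List.orderedInsert, if_neg (h y (List.mem_cons_self))]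
    simp only [List.cons_append, List.cons.injEq, true_and]
    exact ih (fun w hw => h w (List.mem_cons_of_mem y hw))

-- bisect.insort into a sorted list is the ordered insert.
theorem im_insort_eq (s : List Int) (x : Int) (hs : s.Pairwise (· ≤ ·)) :
    PySem.List.insert s ((PySem.List.bisectRight s x : Nat) : Int) x
      = List.orderedInsert (· ≤ ·) x s := by
  obtain ⟨h1, h2, h3⟩ := PySem.List.bisectRight_spec s x hs
  have hmono := List.pairwise_iff_getElem.mp hs
  rw [PySem.List.insert_natCast s (PySem.List.bisectRight s x) x h1]
  apply im_sorted_eq_of_perm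
  · rw [List.pairwise_append]
    refine ⟨List.Pairwise.sublist (List.take_sublist _ _) hs, ?_, ?_⟩
    · rw [List.pairwise_cons]
      refine ⟨?_, List.Pairwise.sublist (List.drop_sublist _ _) hs⟩
      intro b hb
      obtain ⟨j, hj, hbe⟩ := List.mem_drop_iff_getElem.mp hb
      exact le_of_lt (hbe ▸ h3 _ (by omega) (by omega))
    · intro a ha b hb
      obtain ⟨j, hj, hae⟩ := List.mem_take_iff_getElem.mp ha
      rcases List.mem_cons.mp hb with rfl | hb
      · exact hae ▸ h2 j (by omega) (by omega)
      · obtain ⟨i, hi, hbe⟩ := List.mem_drop_iff_getElem.mp hb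
        exact hae ▸ hbe ▸ hmono j _ (by omega) (by omega) (by omega)
  · exact List.Pairwise.orderedInsert x s hs
  · refine List.Perm.trans List.perm_middle ?_
    rw [List.take_append_drop]
    exact (List.perm_orderedInsert (· ≤ ·) x s).symm

-- The two-heap step of A, on heaps that mirror a sorted list s, mirrors orderedInsert x s.
theorem im_heap_step (s : List Int) (x : Int) (hs : s.Pairwise (· ≤ ·)) :
    (let a := (s.length + 1) / 2
     let maxh := ((s.take a).map (fun v => -v)).reverse
     let minh := s.drop a
     let maxh1 := List.orderedInsert (· ≤ ·) (-x) maxh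
     let maxh2 := maxh1.tail
     let minh1 := List.orderedInsert (· ≤ ·) (-(maxh1.headD 0)) minh
     if minh1.length > maxh2.length then
       (List.orderedInsert (· ≤ ·) (-(minh1.headD 0)) maxh2, minh1.tail)
     else (maxh2, minh1))
    = ((((List.orderedInsert (· ≤ ·) x s).take ((s.length + 2) / 2)).map (fun v => -v)).reverse,
       (List.orderedInsert (· ≤ ·) x s).drop ((s.length + 2) / 2)) := by
  dsimp only
  have ha : (s.length + 1) / 2 ≤ s.length := by omega
  set k := s.length with hk
  set a := (k + 1) / 2 with hadef
  set lo := s.take a with hlodef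
  set hi := s.drop a with hhidef
  have hsplit : lo ++ hi = s := List.take_append_drop a s
  have hlo : lo.Pairwise (· ≤ ·) := List.Pairwise.sublist (List.take_sublist _ _) hs
  have hhi : hi.Pairwise (· ≤ ·) := List.Pairwise.sublist (List.drop_sublist _ _) hs
  have hcross : ∀ u ∈ lo, ∀ v ∈ hi, u ≤ v := (List.pairwise_append.mp (hsplit ▸ hs)).2.2
  have hlolen : lo.length = a := by rw [hlodef, List.length_take]; omega
  have hhilen : hi.length = k - a := by rw [hhidef, List.length_drop]
  -- the pushed-then-popped max-heap mirrors L' = orderedInsert x lo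
  rw [im_negrev_orderedInsert lo hlo x]
  set L' := List.orderedInsert (· ≤ ·) x lo with hL'def
  have hL'sorted : L'.Pairwise (· ≤ ·) := List.Pairwise.orderedInsert x lo hlo
  have hL'len : L'.length = a + 1 := by rw [hL'def, List.orderedInsert_length, hlolen]
  have hL'ne : L' ≠ [] := by intro h; rw [h] at hL'len; simp at hL'len
  have hL'perm : L'.Perm (x :: lo) := List.perm_orderedInsert _ x lo
  rw [List.tail_reverse, ← List.map_dropLast]
  rw [List.headD_eq_head?, List.head?_reverse, List.getLast?_map, List.getLast?_eq_getLast hL'ne]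
  set M := L'.getLast hL'ne with hMdef
  simp only [Option.map_some, Option.getD_some, neg_neg]
  set lo1 := L'.dropLast with hlo1def
  have hlo1 : lo1.Pairwise (· ≤ ·) := List.Pairwise.sublist (List.dropLast_sublist _) hL'sorted
  have hlo1len : lo1.length = a := by rw [hlo1def, List.length_dropLast, hL'len]; omega
  have hdec : lo1 ++ [M] = L' := List.dropLast_concat_getLast hL'ne
  have hle_M : ∀ u ∈ lo1, u ≤ M := fun u hu =>
    (List.pairwise_append.mp (hdec ▸ hL'sorted)).2.2 u hu M (by simp)
  set minh1 := List.orderedInsert (· ≤ ·) M hi with hminh1def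
  have hminh1 : minh1.Pairwise (· ≤ ·) := List.Pairwise.orderedInsert M hi hhi
  have hminh1len : minh1.length = k - a + 1 := by
    rw [hminh1def, List.orderedInsert_length, hhilen]
  have hminh1mem : ∀ v ∈ minh1, v = M ∨ v ∈ hi := fun v hv =>
    List.mem_cons.mp ((List.perm_orderedInsert _ M hi).mem_iff.mp hv)
  -- every element of the trimmed lower half is below every element of the grown upper half
  have hcross1 : ∀ u ∈ lo1, ∀ v ∈ minh1, u ≤ v := by
    intro u hu v hv
    rcases hminh1mem v hv with rfl | hvhi
    · exact hle_M u hu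
    · have huL : u ∈ L' := hdec ▸ List.mem_append_left _ hu
      rcases List.mem_cons.mp ((List.perm_orderedInsert (· ≤ ·) x lo).mem_iff.mp (hL'def ▸ huL)) with rfl | hulo
      · by_contra hlt
        have hall : ∀ w ∈ lo, ¬ u ≤ w := fun w hw => by
          have := hcross w hw v hvhi; omega
        have hLeq : L' = lo ++ [u] := im_orderedInsert_of_forall_not lo u hall
        have : lo1 = lo := by rw [hlo1def, hLeq, List.dropLast_concat]
        exact hlt (hcross u (this ▸ hu) v hvhi)
      · exact hcross u hulo v hvhi
  -- combined, the two halves are exactly orderedInsert x s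
  have hEq1 : lo1 ++ minh1 = List.orderedInsert (· ≤ ·) x s := by
    apply im_sorted_eq_of_perm
    · exact List.pairwise_append.mpr ⟨hlo1, hminh1, hcross1⟩
    · exact List.Pairwise.orderedInsert x s hs
    · have p1 : (lo1 ++ minh1).Perm (lo1 ++ (M :: hi)) :=
        List.Perm.append_left lo1 (List.perm_orderedInsert _ M hi)
      have p2 : lo1 ++ (M :: hi) = (lo1 ++ [M]) ++ hi := by rw [List.append_assoc]; rfl
      have p3 : ((lo1 ++ [M]) ++ hi).Perm ((x :: lo) ++ hi) :=
        List.Perm.append_right hi (hdec ▸ hL'perm)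
      have p4 : (x :: lo) ++ hi = x :: s := by rw [List.cons_append, hsplit]
      exact ((p1.trans (p2 ▸ p3)).trans (p4 ▸ List.Perm.refl _)).trans
        (List.perm_orderedInsert _ x s).symm
  have hslen : (List.orderedInsert (· ≤ ·) x s).length = k + 1 := by
    rw [List.orderedInsert_length]
  rcases Nat.mod_two_eq_zero_or_one k with hke | hko
  · -- k even: the rebalance branch fires
    have hcond : minh1.length > (((lo1.map (fun v => -v)).reverse)).length := by
      simp only [List.length_reverse, List.length_map, hminh1len, hlo1len]
      omega
    rw [if_pos hcond]
    -- min_heap head and tail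
    obtain ⟨m2, tl, hcons⟩ := List.exists_cons_of_ne_nil
      (List.length_pos_iff.mp (show 0 < minh1.length by rw [hminh1len]; omega))
    rw [hcons]
    simp only [List.headD_cons, List.tail_cons]
    rw [im_negrev_orderedInsert lo1 hlo1 m2]
    set K := List.orderedInsert (· ≤ ·) m2 lo1 with hKdef
    have hKlen : K.length = a + 1 := by rw [hKdef, List.orderedInsert_length, hlo1len]
    have hm2le : ∀ v ∈ tl, m2 ≤ v := by
      have := hcons ▸ hminh1
      exact (List.pairwise_cons.mp this).1
    have hKt : K ++ tl = List.orderedInsert (· ≤ ·) x s := by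
      rw [← hEq1]
      apply im_sorted_eq_of_perm
      · refine List.pairwise_append.mpr ⟨List.Pairwise.orderedInsert m2 lo1 hlo1,
          (List.pairwise_cons.mp (hcons ▸ hminh1)).2, ?_⟩
        intro u hu v hv
        rcases List.mem_cons.mp ((List.perm_orderedInsert (· ≤ ·) m2 lo1).mem_iff.mp hu) with rfl | hulo1
        · exact hm2le v hv
        · exact hcross1 u hulo1 v (hcons ▸ List.mem_cons_of_mem m2 hv)
      · exact List.pairwise_append.mpr ⟨hlo1, hminh1, hcross1⟩
      · have q1 : (K ++ tl).Perm ((m2 :: lo1) ++ tl) :=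
          List.Perm.append_right tl (List.perm_orderedInsert _ m2 lo1)
        have q2 : ((m2 :: lo1) ++ tl) = m2 :: (lo1 ++ tl) := rfl
        have q3 : (m2 :: (lo1 ++ tl)).Perm (lo1 ++ (m2 :: tl)) := List.perm_middle.symm
        rw [← hcons] at q3
        exact (q1.trans (q2 ▸ q3))
    have hKlen' : K.length = (k + 2) / 2 := by rw [hKlen]; omega
    rw [← hKt, List.take_left' hKlen', List.drop_left' hKlen']
  · -- k odd: no rebalance
    have hcond : ¬ (minh1.length > (((lo1.map (fun v => -v)).reverse)).length) := by
      simp only [List.length_reverse, List.length_map, hminh1len, hlo1len]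
      omega
    rw [if_neg hcond]
    have hlo1len' : lo1.length = (k + 2) / 2 := by rw [hlo1len]; omega
    rw [← hEq1, List.take_left' hlo1len', List.drop_left' hlo1len']

-- headD of the negate-reverse of a prefix is minus the last prefix element.
theorem im_negrev_take_headD (t : List Int) (a : Nat) (h0 : 0 < a) (hle : a ≤ t.length) :
    (((t.take a).map (fun v => -v)).reverse).headD 0 = -(t.getD (a - 1) 0) := by
  rw [List.headD_eq_head?, List.head?_reverse, List.getLast?_map, List.getLast?_take,
    if_neg (by omega), List.getElem?_eq_getElem (show a - 1 < t.length by omega),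
    List.getD_eq_getElem?_getD, List.getElem?_eq_getElem (show a - 1 < t.length by omega)]
  rfl

-- headD of a suffix is the element at the cut.
theorem im_drop_headD (t : List Int) (a : Nat) :
    (t.drop a).headD 0 = t.getD a 0 := by
  rw [List.headD_eq_head?, List.head?_drop, List.getD_eq_getElem?_getD]

-- A's median read off the canonical heaps equals B's median read off the sorted list.
theorem im_med_eq (k : Nat) (t : List Int) (hlen : t.length = k + 1) :
    (if PySem.Int.mod ((k : Int) + 1) 2 == 1 then
        -((((t.take ((k + 2) / 2)).map (fun v => -v)).reverse).headD 0)
      else PySem.Int.truncdiv ((t.drop ((k + 2) / 2)).headD 0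
        - (((t.take ((k + 2) / 2)).map (fun v => -v)).reverse).headD 0) 2)
    = (if t.length % 2 == 1 then t.getD (t.length / 2) 0
      else PySem.Int.truncdiv (t.getD (t.length / 2 - 1) 0 + t.getD (t.length / 2) 0) 2) := by
  have hc1 : (PySem.Int.mod ((k : Int) + 1) 2 == 1) = ((k + 1) % 2 == 1) := by
    have hcast : ((k : Int) + 1) = ((k + 1 : Nat) : Int) := by push_cast; ring
    rw [hcast,
      (by exact_mod_cast PySem.Int.mod_natCast (k + 1) 2 :
        PySem.Int.mod ((k + 1 : Nat) : Int) 2 = (((k + 1) % 2 : Nat) : Int))]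
    rcases Nat.mod_two_eq_zero_or_one (k + 1) with h | h <;> simp [h]
  rw [hlen, hc1]
  rcases Nat.mod_two_eq_zero_or_one (k + 1) with hp | hp
  · -- k + 1 even, k odd
    rw [hp]
    simp only [Nat.reduceBEq, Bool.false_eq_true, if_false]
    rw [im_drop_headD _ _, im_negrev_take_headD _ _ (by omega) (by omega)]
    have e1 : (k + 1) / 2 = (k + 2) / 2 := by omega
    rw [e1, sub_neg_eq_add, add_comm]
  · -- k + 1 odd, k even
    rw [hp]
    simp only [Nat.reduceBEq, if_true]
    rw [im_negrev_take_headD _ _ (by omega) (by omega), neg_neg]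
    have e1 : (k + 1) / 2 = (k + 2) / 2 - 1 := by omega
    rw [e1]

-- Loop invariant: after k iterations B holds a sorted list s and A the mirrored heaps,
-- with identical median lists.
theorem im_loop (arr : List Int) (k : Nat) :
    ∃ s meds : List Int,
      (PySem.List.pyRange 0 (k : Int) 1).foldl (imBodyB arr) ([], []) = (s, meds) ∧
      (PySem.List.pyRange 0 (k : Int) 1).foldl (imBodyA arr) ([], [], [])
        = (((s.take ((k + 1) / 2)).map (fun v => -v)).reverse, s.drop ((k + 1) / 2), meds) ∧
      s.Pairwise (· ≤ ·) ∧ s.length = k := by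
  induction k with
  | zero =>
    refine ⟨[], [], ?_, ?_, List.Pairwise.nil, rfl⟩ <;>
      simp [PySem.List.pyRange_one_eq_nil (le_refl (0 : Int))]
  | succ k ih =>
    obtain ⟨s, meds, hB, hA, hs, hlen⟩ := ih
    have hcast : ((k + 1 : Nat) : Int) = (k : Int) + 1 := by push_cast; ring
    have hr : PySem.List.pyRange 0 ((k + 1 : Nat) : Int) 1
        = PySem.List.pyRange 0 (k : Int) 1 ++ [(k : Int)] := by
      rw [hcast, PySem.List.pyRange_one_succ_right (by exact_mod_cast Nat.zero_le k)]
    rw [hr]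
    set x := PySem.List.pyGetD arr (k : Int) 0 with hxdef
    refine ⟨List.orderedInsert (· ≤ ·) x s,
      meds ++ [if (List.orderedInsert (· ≤ ·) x s).length % 2 == 1 then
          (List.orderedInsert (· ≤ ·) x s).getD ((List.orderedInsert (· ≤ ·) x s).length / 2) 0
        else PySem.Int.truncdiv
          ((List.orderedInsert (· ≤ ·) x s).getD
              ((List.orderedInsert (· ≤ ·) x s).length / 2 - 1) 0
            + (List.orderedInsert (· ≤ ·) x s).getD
              ((List.orderedInsert (· ≤ ·) x s).length / 2) 0) 2],
      ?_, ?_, List.Pairwise.orderedInsert x s hs,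
      by rw [List.orderedInsert_length, hlen]⟩
    · rw [List.foldl_append, hB]
      simp only [List.foldl_cons, List.foldl_nil, imBodyB]
      rw [← hxdef, im_insort_eq s x hs]
    · rw [List.foldl_append, hA]
      simp only [List.foldl_cons, List.foldl_nil, imBodyA]
      rw [← hxdef]
      have hstep := im_heap_step s x hs
      dsimp only at hstep
      rw [hlen] at hstep
      have e : k + 1 + 1 = k + 2 := by omega
      rw [e, hstep,
        im_med_eq k (List.orderedInsert (· ≤ ·) x s) (by rw [List.orderedInsert_length, hlen])]

-- ===== VERDICT (by name: the statement is the Claim_ definition above) =====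
theorem individual_medians_spec : Claim_equal_individual_medians := by
  intro n arr _ _
  unfold Spec_individual_medians individual_medians individual_medians_alt
  rcases le_or_gt n 0 with hn | hn
  · rw [PySem.List.pyRange_one_eq_nil hn]; rfl
  · have hn' : n = ((n.toNat : Nat) : Int) := by omega
    rw [hn']
    obtain ⟨s, meds, hB, hA, _, _⟩ := im_loop arr n.toNat
    rw [hA, hB]
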